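-- pv_equiv track=rewrite | github.com/ghostproxyofficial/WarpDesk | agent/app.py | _force_media_sendonly_in_sdp
-- ===== SOURCE A (Python) =====
-- from typing import Dict, Optional
--
-- def _force_media_sendonly_in_sdp(sdp: str) -> str:
--     lines = sdp.splitlines()
--     if not lines:
--         return sdp
--
--     out: list[str] = []
--     current_media: Optional[str] = None
--
--     for line in lines:
--         if line.startswith("m="):
--             try:
--                 current_media = line[2:].split(" ", 1)[0].strip().lower()
--             except Exception:
--                 current_media = None
--             out.append(line)
--             continue
--
--         if current_media in {"audio", "video"} and line in {
--             "a=inactive",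
--             "a=sendrecv",
--             "a=recvonly",
--         }:
--             out.append("a=sendonly")
--             continue
--
--         out.append(line)
--
--     result: list[str] = []
--     current_media = None
--     has_direction = False
--
--     for idx, line in enumerate(out):
--         if line.startswith("m="):
--             if current_media in {"audio", "video"} and not has_direction:
--                 result.append("a=sendonly")
--             try:
--                 current_media = line[2:].split(" ", 1)[0].strip().lower()
--             except Exception:
--                 current_media = None
--             has_direction = False
--             result.append(line)
--             continue
--
--         if current_media in {"audio", "video"} and line in {
--             "a=inactive",
--             "a=sendrecv",
--             "a=recvonly",
--             "a=sendonly",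
--         }:
--             has_direction = True
--
--         result.append(line)
--
--     if current_media in {"audio", "video"} and not has_direction:
--         result.append("a=sendonly")
--
--     return "\r\n".join(result) + "\r\n"
-- ===== SOURCE B (Python) =====
-- def _force_media_sendonly_in_sdp(sdp: str) -> str:
--     lines = sdp.splitlines()
--     if not lines:
--         return sdp
--
--     # Cut the SDP into a session block followed by one block per "m=" line.
--     blocks: list[list[str]] = []
--     cur: list[str] = []
--     for line in lines:
--         if line.startswith("m="):
--             blocks.append(cur)
--             cur = [line]
--         else:
--             cur.append(line)
--     blocks.append(cur)
--
--     NONSEND = {"a=inactive", "a=sendrecv", "a=recvonly"}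
--     result: list[str] = []
--     for block in blocks:
--         if not block or not block[0].startswith("m="):
--             result.extend(block)
--             continue
--         media = block[0][2:].split(" ", 1)[0].strip().lower()
--         if media not in ("audio", "video"):
--             result.extend(block)
--             continue
--         body = ["a=sendonly" if l in NONSEND else l for l in block[1:]]
--         result.append(block[0])
--         result.extend(body)
--         if "a=sendonly" not in body:
--             result.append("a=sendonly")
--     return "\r\n".join(result) + "\r\n"
-- ===== Notes on version B (the rewrite author's own statement) =====
-- stated objective: alternative
-- what changed: Replaces A's two sequential stateful passes over all lines (first rewriting direction attributes, then re-scanning with a has_direction flag to append missing ones) by a block decomposition: split the SDP into a session block plus one block per m= line, process each audio/video block locally with a single map plus a membership test, and concatenate.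
import Mathlib
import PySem

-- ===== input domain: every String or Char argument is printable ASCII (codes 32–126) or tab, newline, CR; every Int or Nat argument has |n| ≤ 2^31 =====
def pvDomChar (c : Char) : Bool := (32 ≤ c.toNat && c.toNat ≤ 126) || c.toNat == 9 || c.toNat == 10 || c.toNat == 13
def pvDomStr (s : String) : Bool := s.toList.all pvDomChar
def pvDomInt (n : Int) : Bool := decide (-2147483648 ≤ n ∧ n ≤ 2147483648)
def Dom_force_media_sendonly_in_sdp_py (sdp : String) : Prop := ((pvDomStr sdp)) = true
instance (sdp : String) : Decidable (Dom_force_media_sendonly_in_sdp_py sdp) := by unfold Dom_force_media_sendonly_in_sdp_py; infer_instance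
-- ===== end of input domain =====

-- B rewrites A's two global stateful passes as a per-media-block decomposition; same values everywhere (objective: alternative).

-- shared helpers: the media-kind parse 'line[2:].split(" ", 1)[0].strip().lower()'
-- (Python's split(sep, 1) never returns an empty list, so the '[0]' never raises; headD "" is exact)
def pvMediaKind (line : String) : String :=
  PySem.Str.lower (PySem.Str.strip (((PySem.Str.splitMax? (PySem.Str.slice line (some 2) none) " " 1).getD []).headD ""))

def pvDir3 (l : String) : Bool := l == "a=inactive" || l == "a=sendrecv" || l == "a=recvonly"

-- ===== PORT A =====
def pvIsAV (cm : Option String) : Bool := cm == some "audio" || cm == some "video"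

def pvDir4 (l : String) : Bool := pvDir3 l || l == "a=sendonly"

def pvPass1 : Option String → List String → List String
  | _, [] => []
  | cm, l :: rest =>
    if PySem.Str.startswith l "m=" then l :: pvPass1 (some (pvMediaKind l)) rest
    else if pvIsAV cm && pvDir3 l then "a=sendonly" :: pvPass1 cm rest
    else l :: pvPass1 cm rest

def pvPass2 : Option String → Bool → List String → List String
  | cm, hd, [] => if pvIsAV cm && !hd then ["a=sendonly"] else []
  | cm, hd, l :: rest =>
    if PySem.Str.startswith l "m=" then
      (if pvIsAV cm && !hd then ["a=sendonly"] else []) ++ l :: pvPass2 (some (pvMediaKind l)) false rest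
    else if pvIsAV cm && pvDir4 l then l :: pvPass2 cm true rest
    else l :: pvPass2 cm hd rest

def force_media_sendonly_in_sdp_py (sdp : String) : String :=
  let lines := PySem.Str.splitlines sdp
  if lines = [] then sdp
  else PySem.Str.join "\r\n" (pvPass2 none false (pvPass1 none lines)) ++ "\r\n"

-- ===== PORT B =====
def pvBlocks : List String → List String → List (List String)
  | cur, [] => [cur]
  | cur, l :: rest =>
    if PySem.Str.startswith l "m=" then cur :: pvBlocks [l] rest
    else pvBlocks (cur ++ [l]) rest

def pvProcBlock : List String → List String
  | [] => []
  | h :: t =>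
    if PySem.Str.startswith h "m=" then
      if pvMediaKind h == "audio" || pvMediaKind h == "video" then
        let body := t.map (fun l => if pvDir3 l then "a=sendonly" else l)
        h :: body ++ (if body.contains "a=sendonly" then [] else ["a=sendonly"])
      else h :: t
    else h :: t

def force_media_sendonly_in_sdp_py_alt (sdp : String) : String :=
  let lines := PySem.Str.splitlines sdp
  if lines = [] then sdp
  else PySem.Str.join "\r\n" ((pvBlocks [] lines).flatMap pvProcBlock) ++ "\r\n"

-- ===== PRECONDITION & SPEC =====
def Spec_force_media_sendonly_in_sdp_py (sdp : String) (out : String) : Prop := out = force_media_sendonly_in_sdp_py_alt sdp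
instance (sdp : String) (out : String) : Decidable (Spec_force_media_sendonly_in_sdp_py sdp out) := by unfold Spec_force_media_sendonly_in_sdp_py; infer_instance

-- ===== CLAIM =====
def Claim_equal_force_media_sendonly_in_sdp_py : Prop := ∀ (sdp : String), Dom_force_media_sendonly_in_sdp_py sdp → Spec_force_media_sendonly_in_sdp_py sdp (force_media_sendonly_in_sdp_py sdp)

-- ===== LEMMAS AND PROOFS =====

theorem pass1_nonav (pre : List String) (xs : List String) (cm : Option String)
    (hpre : ∀ l ∈ pre, PySem.Str.startswith l "m=" = false) (hav : pvIsAV cm = false) :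
    pvPass1 cm (pre ++ xs) = pre ++ pvPass1 cm xs := by
  induction pre with
  | nil => rfl
  | cons a t ih =>
    have ha := hpre a (by simp)
    simp at ha
    simp [pvPass1, ha, hav, ih (fun l hl => hpre l (by simp [hl]))]

theorem pass2_nonav (pre : List String) (xs : List String) (cm : Option String) (hd : Bool)
    (hpre : ∀ l ∈ pre, PySem.Str.startswith l "m=" = false) (hav : pvIsAV cm = false) :
    pvPass2 cm hd (pre ++ xs) = pre ++ pvPass2 cm hd xs := by
  induction pre with
  | nil => rfl
  | cons a t ih =>
    have ha := hpre a (by simp)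
    simp at ha
    simp [pvPass2, ha, hav, ih (fun l hl => hpre l (by simp [hl]))]

theorem pass1_av (body : List String) (xs : List String) (cm : Option String)
    (hb : ∀ l ∈ body, PySem.Str.startswith l "m=" = false) (hav : pvIsAV cm = true) :
    pvPass1 cm (body ++ xs)
      = body.map (fun l => if pvDir3 l then "a=sendonly" else l) ++ pvPass1 cm xs := by
  induction body with
  | nil => rfl
  | cons a t ih =>
    have ha := hb a (by simp)
    simp at ha
    by_cases h3 : pvDir3 a = true
    · simp [pvPass1, ha, hav, h3, ih (fun l hl => hb l (by simp [hl]))]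
    · simp only [Bool.not_eq_true] at h3
      simp [pvPass1, ha, hav, h3, ih (fun l hl => hb l (by simp [hl]))]

theorem pass2_av (body : List String) (xs : List String) (cm : Option String) (hd : Bool)
    (hb : ∀ l ∈ body, PySem.Str.startswith l "m=" = false ∧ pvDir3 l = false)
    (hav : pvIsAV cm = true) :
    pvPass2 cm hd (body ++ xs)
      = body ++ pvPass2 cm (hd || body.contains "a=sendonly") xs := by
  induction body generalizing hd with
  | nil => simp
  | cons a t ih =>
    have ha := hb a (by simp)
    simp at ha
    have ht : ∀ l ∈ t, PySem.Str.startswith l "m=" = false ∧ pvDir3 l = false :=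
      fun l hl => hb l (by simp [hl])
    by_cases hs : a = "a=sendonly"
    · subst hs
      simp only [List.cons_append, pvPass2, List.contains_cons]
      rw [if_neg (by decide), if_pos (by simp [hav, pvDir4])]
      rw [ih true ht]
      simp
    · simp only [List.cons_append, pvPass2, List.contains_cons]
      rw [if_neg (by simp [ha.1]), if_neg (by simp [hav, pvDir4, ha.2, hs])]
      rw [ih hd ht]
      have hba : ("a=sendonly" == a) = false := beq_eq_false_iff_ne.mpr (Ne.symm hs)
      simp [hba]

-- at a block boundary (empty rest or a leading m= line) the pass-2 state only contributes its pending append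
theorem pass_restart (cm cm' : Option String) (hd : Bool) (xs : List String)
    (hx : xs = [] ∨ ∃ m t, xs = m :: t ∧ PySem.Str.startswith m "m=" = true) :
    pvPass2 cm hd (pvPass1 cm' xs)
      = (if pvIsAV cm && !hd then ["a=sendonly"] else []) ++ pvPass2 none false (pvPass1 none xs) := by
  rcases hx with rfl | ⟨m, t, rfl, hm⟩
  · simp [pvPass1, pvPass2, pvIsAV]
  · simp at hm
    simp [pvPass1, pvPass2, hm, pvIsAV]

theorem blocks_pre (pre : List String) (xs : List String) (cur : List String)
    (hpre : ∀ l ∈ pre, PySem.Str.startswith l "m=" = false) :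
    pvBlocks cur (pre ++ xs) = pvBlocks (cur ++ pre) xs := by
  induction pre generalizing cur with
  | nil => simp
  | cons a t ih =>
    have ha := hpre a (by simp)
    simp at ha
    rw [List.cons_append]
    simp only [pvBlocks]
    rw [if_neg (by simp [ha])]
    rw [ih (cur ++ [a]) (fun l hl => hpre l (by simp [hl]))]
    simp

theorem procBlock_nonmedia (b : List String)
    (hb : ∀ l ∈ b, PySem.Str.startswith l "m=" = false) :
    pvProcBlock b = b := by
  cases b with
  | nil => rfl
  | cons h t =>
    have hh := hb h (by simp)
    simp at hh
    simp [pvProcBlock, hh]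

theorem dropWhile_head_false {α : Type} (p : α → Bool) (l : List α) (a : α) (t : List α)
    (h : l.dropWhile p = a :: t) : p a = false := by
  induction l with
  | nil => simp at h
  | cons x xs ih =>
    by_cases hx : p x = true
    · rw [List.dropWhile_cons_of_pos hx] at h; exact ih h
    · rw [List.dropWhile_cons_of_neg hx] at h
      cases h
      simpa using hx

theorem main_eq : ∀ (xs : List String),
    pvPass2 none false (pvPass1 none xs) = (pvBlocks [] xs).flatMap pvProcBlock := by
  intro xs
  induction hn : xs.length using Nat.strong_induction_on generalizing xs with
  | _ n ih =>
  subst hn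
  have havn : pvIsAV none = false := rfl
  set p : String → Bool := fun l => !(PySem.Str.startswith l "m=") with hp
  have hsplit : xs = xs.takeWhile p ++ xs.dropWhile p := (List.takeWhile_append_dropWhile).symm
  have hpre : ∀ l ∈ xs.takeWhile p, PySem.Str.startswith l "m=" = false := by
    intro l hl
    have := List.mem_takeWhile_imp hl
    simpa [hp] using this
  rw [hsplit, pass1_nonav _ _ _ hpre havn, pass2_nonav _ _ _ _ hpre havn,
      blocks_pre _ _ _ hpre]
  simp only [List.nil_append]
  cases hrest : xs.dropWhile p with
  | nil =>
    simp [pvPass1, pvPass2, pvBlocks, havn, procBlock_nonmedia _ hpre]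
  | cons m tail =>
    have hm : PySem.Str.startswith m "m=" = true := by
      simpa [hp] using dropWhile_head_false p xs m tail hrest
    have hbody : ∀ l ∈ tail.takeWhile p, PySem.Str.startswith l "m=" = false := by
      intro l hl
      have := List.mem_takeWhile_imp hl
      simpa [hp] using this
    have htail : tail = tail.takeWhile p ++ tail.dropWhile p := (List.takeWhile_append_dropWhile).symm
    have hx2 : tail.dropWhile p = [] ∨
        ∃ m2 t2, tail.dropWhile p = m2 :: t2 ∧ PySem.Str.startswith m2 "m=" = true := by
      cases hr2 : tail.dropWhile p with
      | nil => exact Or.inl rfl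
      | cons m2 t2 =>
        exact Or.inr ⟨m2, t2, rfl, by simpa [hp] using dropWhile_head_false p tail m2 t2 hr2⟩
    have hlen2 : (tail.dropWhile p).length < xs.length := by
      have h1 : xs.length = (List.takeWhile p xs).length + (m :: tail).length := by
        conv_lhs => rw [hsplit]
        rw [hrest]
        simp
      have h2 : (tail.dropWhile p).length ≤ tail.length := List.length_dropWhile_le p tail
      simp only [List.length_cons] at h1
      omega
    have ihr := ih (tail.dropWhile p).length hlen2 (tail.dropWhile p) rfl
    have hRHS : (pvBlocks [m] tail).flatMap pvProcBlock
        = pvProcBlock (m :: tail.takeWhile p)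
          ++ (pvBlocks [] (tail.dropWhile p)).flatMap pvProcBlock := by
      conv_lhs => rw [htail]
      rw [blocks_pre _ _ _ hbody]
      rcases hx2 with hr2 | ⟨m2, t2, hr2, hm2⟩
      · rw [hr2]
        simp [pvBlocks, pvProcBlock]
      · rw [hr2]
        simp only [pvBlocks]
        rw [if_pos hm2, if_pos hm2]
        simp [pvProcBlock]
    have hstep : pvBlocks (List.takeWhile p xs) (m :: tail)
        = (List.takeWhile p xs) :: pvBlocks [m] tail := by
      simp only [pvBlocks]
      rw [if_pos hm]
    rw [hstep]
    simp only [List.flatMap_cons, procBlock_nonmedia _ hpre]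
    congr 1
    rw [hRHS]
    by_cases hav : pvIsAV (some (pvMediaKind m)) = true
    · conv_lhs => rw [htail]
      simp only [pvPass1]
      rw [if_pos hm]
      rw [pass1_av _ (tail.dropWhile p) _ hbody hav]
      simp only [pvPass2]
      rw [if_pos hm, if_neg (by simp [havn])]
      simp only [List.nil_append]
      have hmb' : ∀ l ∈ (tail.takeWhile p).map (fun l => if pvDir3 l then "a=sendonly" else l),
          PySem.Str.startswith l "m=" = false ∧ pvDir3 l = false := by
        intro l hl
        simp only [List.mem_map] at hl
        obtain ⟨a, ha, rfl⟩ := hl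
        by_cases h3 : pvDir3 a = true
        · rw [if_pos h3]
          exact ⟨by decide, by decide⟩
        · rw [if_neg h3]
          exact ⟨hbody a ha, by simpa using h3⟩
      rw [pass2_av _ (pvPass1 (some (pvMediaKind m)) (tail.dropWhile p)) _ false hmb' hav]
      rw [pass_restart _ _ _ _ hx2, ihr]
      have havm : (pvMediaKind m == "audio" || pvMediaKind m == "video") = true := by
        simpa [pvIsAV] using hav
      have hproc : pvProcBlock (m :: List.takeWhile p tail)
          = m :: ((tail.takeWhile p).map (fun l => if pvDir3 l then "a=sendonly" else l)
            ++ (if ((tail.takeWhile p).map (fun l => if pvDir3 l then "a=sendonly" else l)).contains "a=sendonly"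
                then [] else ["a=sendonly"])) := by
        simp only [pvProcBlock]
        rw [if_pos hm, if_pos havm]
        simp
      rw [hproc]
      cases hc : ((tail.takeWhile p).map (fun l => if pvDir3 l then "a=sendonly" else l)).contains "a=sendonly" <;>
        simp [hc, hav]
    · simp only [Bool.not_eq_true] at hav
      conv_lhs => rw [htail]
      simp only [pvPass1]
      rw [if_pos hm]
      rw [pass1_nonav _ (tail.dropWhile p) _ hbody hav]
      simp only [pvPass2]
      rw [if_pos hm, if_neg (by simp [havn])]
      simp only [List.nil_append]
      rw [pass2_nonav _ (pvPass1 (some (pvMediaKind m)) (tail.dropWhile p)) _ false hbody hav]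
      rw [pass_restart _ _ _ _ hx2, ihr]
      have hproc : pvProcBlock (m :: List.takeWhile p tail) = m :: List.takeWhile p tail := by
        have havm : (pvMediaKind m == "audio" || pvMediaKind m == "video") = false := by
          simpa [pvIsAV] using hav
        simp only [pvProcBlock]
        rw [if_pos hm, if_neg (by rw [havm]; exact Bool.false_ne_true)]
      rw [hproc]
      simp [hav]

-- ===== VERDICT =====
theorem force_media_sendonly_in_sdp_py_spec : Claim_equal_force_media_sendonly_in_sdp_py := by
  intro sdp _
  unfold Spec_force_media_sendonly_in_sdp_py force_media_sendonly_in_sdp_py force_media_sendonly_in_sdp_py_alt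
  cases h : PySem.Str.splitlines sdp with
  | nil => simp
  | cons a t => simp [main_eq (a :: t)]
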